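-- pv_equiv track=rewrite | github.com/981377660LMT/algorithm-study | 22_专题/离线查询/二维矩阵以及染色问题倒序离线查询/3237. Alt 和 Tab模拟.py | simulationResult
-- ===== SOURCE A (Python) =====
-- from typing import List
--
-- def simulationResult(windows: List[int], queries: List[int]) -> List[int]:
--     """离线."""
--     visited = set()
--     res = []
--     for v in queries[::-1]:
--         if v not in visited:
--             visited.add(v)
--             res.append(v)
--     for v in windows:
--         if v not in visited:
--             res.append(v)
--     return res
-- ===== SOURCE B (Python) =====
-- from typing import List
--
-- def simulationResult(windows: List[int], queries: List[int]) -> List[int]: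
--     last = {}
--     for i, v in enumerate(queries):
--         last[v] = i
--     accessed = sorted(last.keys(), key=lambda v: -last[v])
--     return accessed + [v for v in windows if v not in last]
-- ===== Notes on version B (the rewrite author's own statement) =====
-- stated objective: alternative
-- what changed: A dedups a reversed copy of queries with a visited set in one backward scan; B instead makes a forward pass recording each query value's last occurrence index in a dict, obtains the accessed order by sorting the dict keys by descending last index, and filters windows against the dict keys.
import Mathlib
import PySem

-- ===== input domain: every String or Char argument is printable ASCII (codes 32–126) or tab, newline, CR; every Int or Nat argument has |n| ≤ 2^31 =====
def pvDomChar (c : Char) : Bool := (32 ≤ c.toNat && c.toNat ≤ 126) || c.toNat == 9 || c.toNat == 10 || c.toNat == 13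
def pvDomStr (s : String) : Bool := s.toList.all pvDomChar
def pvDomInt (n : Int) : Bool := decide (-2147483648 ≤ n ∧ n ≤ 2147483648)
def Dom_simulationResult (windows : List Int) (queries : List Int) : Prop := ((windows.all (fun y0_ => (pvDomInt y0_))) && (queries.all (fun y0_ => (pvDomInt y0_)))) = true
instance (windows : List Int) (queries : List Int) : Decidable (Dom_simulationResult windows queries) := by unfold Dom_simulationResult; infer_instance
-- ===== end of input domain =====

-- B replaces A's reverse-scan dedup by a forward last-occurrence dict plus one sort (alternative decomposition, same result).

-- ===== PORT A =====
-- reverse-dedup of queries (visited set + appended list), then windows not yet visited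
def simulationResult (windows : List Int) (queries : List Int) : List Int :=
  -- queries[::-1]: slice? with step -1 is never none (step ≠ 0)
  let st := ((PySem.List.slice? queries none none (-1)).getD []).foldl
      (fun (s : PySem.Set Int × List Int) v =>
        if !(PySem.Set.contains s.1 v) then (PySem.Set.add s.1 v, s.2 ++ [v]) else s)
      (PySem.Set.empty, [])
  windows.foldl (fun res v => if !(PySem.Set.contains st.1 v) then res ++ [v] else res) st.2

-- ===== PORT B =====
def simulationResult_alt (windows : List Int) (queries : List Int) : List Int :=
  let last := (PySem.List.enumerate queries).foldl
      (fun (d : PySem.Dict Int Int) p => d.insert p.2 p.1) PySem.Dict.empty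
  -- key lambda v: -last[v]; every sorted element is a key of `last`, so getD is exact
  let accessed := PySem.List.sorted (PySem.Dict.keys last)
      (fun v => -(PySem.Dict.getD last v 0)) false
  accessed ++ windows.filter (fun v => !(PySem.Dict.contains last v))

-- ===== PRECONDITION & SPEC =====
def Spec_simulationResult (windows : List Int) (queries : List Int) (out : List Int) : Prop := out = simulationResult_alt windows queries
instance (windows : List Int) (queries : List Int) (out : List Int) : Decidable (Spec_simulationResult windows queries out) := by unfold Spec_simulationResult; infer_instance

-- ===== CLAIM (what is proved, stated in full; the proofs are below) =====
def Claim_equal_simulationResult : Prop := ∀ (windows : List Int) (queries : List Int), Dom_simulationResult windows queries → Spec_simulationResult windows queries (simulationResult windows queries)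

-- ===== LEMMAS AND PROOFS =====

-- the last-occurrence dict B builds from qs
def pvLastDict (qs : List Int) : PySem.Dict Int Int :=
  (PySem.List.enumerate qs).foldl (fun d p => d.insert p.2 p.1) PySem.Dict.empty

-- A's paired loop keeps its two accumulators equal: both are the running Set.add fold
theorem pvPairFold (l : List Int) (s : PySem.Set Int) :
    l.foldl (fun (st : PySem.Set Int × List Int) v =>
        if !(PySem.Set.contains st.1 v) then (PySem.Set.add st.1 v, st.2 ++ [v]) else st) (s, s)
    = (l.foldl PySem.Set.add s, l.foldl PySem.Set.add s) := by
  induction l generalizing s with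
  | nil => rfl
  | cons x t ih =>
    simp only [List.foldl_cons]
    by_cases hx : x ∈ s
    · rw [if_neg (by simp [PySem.Set.contains, hx])]
      rw [show PySem.Set.add s x = s from by simp [PySem.Set.add, hx]]
      exact ih s
    · rw [if_pos (by simp [PySem.Set.contains, hx])]
      rw [show PySem.Set.add s x = s ++ [x] from by simp [PySem.Set.add, hx]]
      exact ih (s ++ [x])

theorem pvFoldlAdd (l : List Int) (s : List Int) :
    l.foldl PySem.Set.add s = s ++ (PySem.Set.ofList l).filter (fun y => decide (y ∉ s)) := by
  induction l generalizing s with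
  | nil => simp [PySem.Set.ofList]
  | cons x t ih =>
    have hofl : PySem.Set.ofList (x :: t)
        = [x] ++ (PySem.Set.ofList t).filter (fun y => decide (y ∉ ([x] : List Int))) := by
      have h0 : PySem.Set.ofList (x :: t) = t.foldl PySem.Set.add [x] := by
        simp [PySem.Set.ofList_eq_foldl, PySem.Set.add, PySem.Set.contains]
      rw [h0, ih]
    rw [List.foldl_cons, ih, hofl]
    by_cases hx : x ∈ s
    · have hadd : PySem.Set.add s x = s := by simp [PySem.Set.add, PySem.Set.contains, hx]
      rw [hadd]
      simp only [List.filter_append, List.filter_filter, List.append_assoc]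
      congr 1
      have h1 : List.filter (fun y => decide (y ∉ s)) [x] = [] := by simp [hx]
      rw [h1, List.nil_append]
      apply List.filter_congr
      intro y hy
      by_cases hys : y ∈ s
      · simp [hys]
      · have : y ≠ x := fun h => hys (h ▸ hx)
        simp [hys, this]
    · have hadd : PySem.Set.add s x = s ++ [x] := by
        simp [PySem.Set.add, PySem.Set.contains, hx]
      rw [hadd]
      simp only [List.filter_append, List.filter_filter, List.append_assoc]
      congr 1
      have h1 : List.filter (fun y => decide (y ∉ s)) [x] = [x] := by simp [hx]
      rw [h1]
      congr 1
      apply List.filter_congr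
      intro y hy
      by_cases hys : y ∈ s <;> by_cases hyx : y = x <;>
        simp [hys, hyx, List.mem_append]

theorem pvOfListCons (x : Int) (l : List Int) :
    PySem.Set.ofList (x :: l) = x :: (PySem.Set.ofList l).filter (fun y => decide (y ≠ x)) := by
  have h0 : PySem.Set.ofList (x :: l) = l.foldl PySem.Set.add [x] := by
    simp [PySem.Set.ofList_eq_foldl, PySem.Set.add, PySem.Set.contains]
  rw [h0, pvFoldlAdd]
  simp only [List.singleton_append, List.cons.injEq, true_and]
  apply List.filter_congr
  intro y hy
  simp

theorem pvLastDictSnoc (t : List Int) (x : Int) :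
    pvLastDict (t ++ [x]) = (pvLastDict t).insert x (t.length : Int) := by
  unfold pvLastDict
  rw [PySem.List.enumerate_append, List.foldl_append]
  simp [PySem.List.enumerate_cons, PySem.List.enumerate_nil]

theorem pvLastDictLt (qs : List Int) :
    ∀ v ∈ qs, PySem.Dict.getD (pvLastDict qs) v 0 < (qs.length : Int) := by
  induction qs using List.reverseRecOn with
  | nil => intro v hv; simp at hv
  | append_singleton t x ih =>
    intro v hv
    rw [pvLastDictSnoc, PySem.Dict.getD_insert]
    by_cases h : v = x
    · simp only [h, List.length_append, List.length_cons, List.length_nil]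
      push_cast; omega
    · rw [if_neg h]
      have hv' : v ∈ t := by
        rcases List.mem_append.mp hv with h1 | h1
        · exact h1
        · exact absurd (List.mem_singleton.mp h1) h
      have := ih v hv'
      simp only [List.length_append, List.length_cons, List.length_nil]
      push_cast; omega

-- reverse-dedup order is strictly decreasing last-occurrence order
theorem pvMainPairwise (qs : List Int) :
    (PySem.Set.ofList qs.reverse).Pairwise
      (fun a b => PySem.Dict.getD (pvLastDict qs) b 0 < PySem.Dict.getD (pvLastDict qs) a 0) := by
  induction qs using List.reverseRecOn with
  | nil => simp [PySem.Set.ofList]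
  | append_singleton t x ih =>
    have hrev : (t ++ [x]).reverse = x :: t.reverse := by simp
    rw [hrev, pvOfListCons, pvLastDictSnoc]
    constructor
    · intro b hb
      have hbmem := List.mem_of_mem_filter hb
      have hbx : b ≠ x := by simpa using List.of_mem_filter hb
      have hbt : b ∈ t := List.mem_reverse.mp ((PySem.Set.mem_ofList _ _).mp hbmem)
      rw [PySem.Dict.getD_insert, PySem.Dict.getD_insert, if_neg hbx, if_pos rfl]
      exact pvLastDictLt t b hbt
    · refine ((ih.sublist List.filter_sublist).imp_of_mem ?_)
      intro a b ha hb h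
      have hax : a ≠ x := by simpa using List.of_mem_filter ha
      have hbx : b ≠ x := by simpa using List.of_mem_filter hb
      rw [PySem.Dict.getD_insert, PySem.Dict.getD_insert, if_neg hax, if_neg hbx]
      exact h

theorem pvKeysLast (qs : List Int) : (pvLastDict qs).keys = PySem.Set.ofList qs := by
  induction qs using List.reverseRecOn with
  | nil => rfl
  | append_singleton t x ih =>
    rw [pvLastDictSnoc]
    have hofl : PySem.Set.ofList (t ++ [x]) = PySem.Set.add (PySem.Set.ofList t) x := by
      rw [PySem.Set.ofList_eq_foldl, PySem.Set.ofList_eq_foldl, List.foldl_append]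
      rfl
    rw [hofl, ← ih]
    by_cases hc : (pvLastDict t).contains x = true
    · rw [PySem.Dict.keys_insert_of_contains _ _ hc]
      have hm : x ∈ (pvLastDict t).keys := (PySem.Dict.contains_iff_mem_keys _ _).mp hc
      simp [PySem.Set.add, hm]
    · have hc' : (pvLastDict t).contains x = false := by
        cases h : (pvLastDict t).contains x
        · rfl
        · exact absurd h hc
      rw [PySem.Dict.keys_insert_of_not_contains _ _ hc']
      have hm : x ∉ (pvLastDict t).keys := fun hm =>
        hc ((PySem.Dict.contains_iff_mem_keys _ _).mpr hm)
      simp [PySem.Set.add, hm]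

theorem pvSortedEq (qs : List Int) :
    PySem.List.sorted ((pvLastDict qs).keys) (fun v => -(PySem.Dict.getD (pvLastDict qs) v 0)) false
      = PySem.Set.ofList qs.reverse := by
  apply PySem.List.sorted_eq_of_perm_of_pairwise_lt
  · rw [pvKeysLast]
    rw [List.perm_ext_iff_of_nodup (PySem.Set.nodup_ofList _) (PySem.Set.nodup_ofList _)]
    intro a
    simp [PySem.Set.mem_ofList, List.mem_reverse]
  · exact (pvMainPairwise qs).imp (fun h => by omega)

-- ===== VERDICT (by name: the statement is the Claim_ definition above) =====
theorem simulationResult_spec : Claim_equal_simulationResult := by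
  intro windows queries _
  unfold Spec_simulationResult
  simp only [simulationResult, simulationResult_alt]
  rw [PySem.List.slice?_none_none_neg_one]
  simp only [Option.getD_some]
  rw [show ((PySem.Set.empty : PySem.Set Int), ([] : List Int))
        = (([] : List Int), ([] : List Int)) from rfl]
  simp only [pvPairFold]
  simp only [← PySem.Set.ofList_eq_foldl]
  refine Eq.trans (PySem.List.foldl_append_if_eq_filter
        (fun v => !PySem.Set.contains (PySem.Set.ofList queries.reverse) v)
        windows (PySem.Set.ofList queries.reverse)) ?_
  have hd : (PySem.List.enumerate queries).foldl
      (fun (d : PySem.Dict Int Int) p => d.insert p.2 p.1) PySem.Dict.empty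
      = pvLastDict queries := rfl
  simp only [hd, pvSortedEq]
  congr 1
  apply List.filter_congr
  intro v hv
  simp [PySem.Set.contains, PySem.Dict.contains_eq_decide_mem_keys, pvKeysLast,
        PySem.Set.mem_ofList, List.mem_reverse]
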